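-- pv_equiv track=rewrite | github.com/KScaesar/DSA-python | math/prefix_sum_test.py | code3_v2
-- ===== SOURCE A (Python) =====
-- def code3_v2(data: str) -> int:
--     # 只能用在 求偶數次數的情境
--
--     # 如果兩個prefix xor 一樣
--     # 代表他們中間都會是偶數個
--     #
--     # x1 = a1 xor a2 xor a3
--     # x2 = a1 xor a2 xor a3 xor a4 xor a5
--     # 如果x1 == x2 代表 a4 xor a5 == 0
--
--     # a到z共26個字
--     # 每一個字 占一個bit共26bits
--     # int 32bit可以放得下
--     # 然後偶數個,可以用(全部)xor 來測試
--
--     size = len(data)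
--     prefix = 0
--     memo = dict()
--     memo[0] = -1
--     ans = 0
--
--     for idx in range(size):
--         c = ord(data[idx]) - ord('a')
--         prefix ^= (1 << c)
--         if prefix not in memo:
--             memo[prefix] = idx
--         else:
--             ans = max(ans, idx - memo[prefix])
--
--     return ans
-- ===== SOURCE B (Python) =====
-- def code3_v2(data: str) -> int:
--     # Brute force: for each start index, rescan with a running parity mask.
--     n = len(data)
--     ans = 0
--     for i in range(n):
--         mask = 0
--         for j in range(i, n):
--             mask ^= 1 << (ord(data[j]) - ord('a'))
--             if mask == 0:
--                 ans = max(ans, j - i + 1)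
--     return ans
-- ===== Notes on version B (the rewrite author's own statement) =====
-- stated objective: alternative
-- what changed: Replaced the single-pass prefix-parity hashmap with a brute-force nested loop that, for every start index, rescans the suffix with a running xor mask and records zero-mask windows.
import Mathlib
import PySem

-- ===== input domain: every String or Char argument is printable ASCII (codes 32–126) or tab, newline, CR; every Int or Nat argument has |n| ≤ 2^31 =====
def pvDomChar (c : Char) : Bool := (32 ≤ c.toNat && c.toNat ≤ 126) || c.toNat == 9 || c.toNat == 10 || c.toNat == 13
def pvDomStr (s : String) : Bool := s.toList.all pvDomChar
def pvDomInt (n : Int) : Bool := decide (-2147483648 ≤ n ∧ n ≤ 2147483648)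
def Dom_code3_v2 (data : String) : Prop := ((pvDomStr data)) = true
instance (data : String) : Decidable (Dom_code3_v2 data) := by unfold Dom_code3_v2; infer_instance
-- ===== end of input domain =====

-- B replaces A's single-pass prefix-parity hashmap with a brute-force nested rescan
-- per start index (objective: alternative decomposition, not faster).

-- ===== PORT A =====
-- one bit per letter: 1 shifted left by (character code minus 97); exact for codes ≥ 97 (see Pre_)
def pvBit (c : Char) : Nat := 1 <<< (c.toNat - 97)

-- the for-loop of A: state (idx, prefix, memo, ans)
def pvLoopA : List Char → Nat → Nat → PySem.Dict Nat Int → Int → Int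
  | [], _, _, _, ans => ans
  | c :: rest, idx, pfx, memo, ans =>
    let pfx' := pfx ^^^ pvBit c
    match memo.get? pfx' with
    | none => pvLoopA rest (idx + 1) pfx' (memo.insert pfx' (idx : Int)) ans
    | some m => pvLoopA rest (idx + 1) pfx' memo (max ans ((idx : Int) - m))

def code3_v2 (data : String) : Int :=
  pvLoopA data.toList 0 0 ((PySem.Dict.empty).insert 0 (-1)) 0

-- ===== PORT B =====
-- inner loop: j runs over the suffix, mask is the running parity of data[i..j-1]
def pvLoopBInner : List Char → Nat → Nat → Nat → Int → Int
  | [], _, _, _, ans => ans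
  | c :: rest, j, i, mask, ans =>
    let mask' := mask ^^^ pvBit c
    if mask' = 0 then pvLoopBInner rest (j + 1) i mask' (max ans ((j : Int) - (i : Int) + 1))
    else pvLoopBInner rest (j + 1) i mask' ans

-- outer loop: i runs over all start indices
def pvLoopBOuter : List Char → Nat → Int → Int
  | [], _, ans => ans
  | c :: rest, i, ans => pvLoopBOuter rest (i + 1) (pvLoopBInner (c :: rest) i i 0 ans)

def code3_v2_alt (data : String) : Int := pvLoopBOuter data.toList 0 0

-- ===== PRECONDITION & SPEC =====
-- Pre_ excludes exactly the inputs containing a character with code below 97: there the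
-- shift amount (code minus 97) is negative and Python raises ValueError, in A and in B alike.
def Pre_code3_v2 (data : String) : Prop := data.toList.all (fun c => 97 ≤ c.toNat) = true
instance (data : String) : Decidable (Pre_code3_v2 data) := by unfold Pre_code3_v2; infer_instance
def pvWitness_code3_v2 : String := "abca"

def Spec_code3_v2 (data : String) (out : Int) : Prop := out = code3_v2_alt data
instance (data : String) (out : Int) : Decidable (Spec_code3_v2 data out) := by unfold Spec_code3_v2; infer_instance

-- ===== CLAIM =====
def Claim_equal_code3_v2 : Prop := ∀ (data : String), Dom_code3_v2 data → Pre_code3_v2 data → Spec_code3_v2 data (code3_v2 data)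

-- ===== LEMMAS AND PROOFS =====

-- the xor-parity of a list of characters
def pvPref (l : List Char) : Nat := l.foldl (fun a c => a ^^^ pvBit c) 0

-- list of all prefix parities of l (length l.length + 1)
def pvPlist (l : List Char) : List Nat :=
  (List.range (l.length + 1)).map (fun k => pvPref (l.take k))

-- first index whose prefix parity equals that of position b
def pvFO (l : List Char) (b : Nat) : Nat := (pvPlist l).idxOf (pvPref (l.take b))

-- the common specification, stated as two folds over index ranges
def pvStepA (l : List Char) (acc : Int) (b : Nat) : Int :=
  if pvFO l b < b then max acc (((b - pvFO l b : Nat) : Int)) else acc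

def pvStepB (l : List Char) (i : Nat) (acc : Int) (b : Nat) : Int :=
  if pvPref (l.take b) = pvPref (l.take i) then max acc (((b - i : Nat) : Int)) else acc

def pvOuterStep (l : List Char) (acc : Int) (i : Nat) : Int :=
  List.foldl (pvStepB l i) acc (List.range' (i + 1) (l.length - i))

-- generic fold-max lemmas
theorem pv_fold_ge {α : Type} (f : Int → α → Int) (h : ∀ a x, a ≤ f a x) :
    ∀ (xs : List α) (a : Int), a ≤ List.foldl f a xs := by
  intro xs
  induction xs with
  | nil => intro a; simp
  | cons y t ih => intro a; exact le_trans (h a y) (ih (f a y))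

theorem pv_fold_le {α : Type} (f : Int → α → Int) (c : Int) :
    ∀ (xs : List α) (a : Int), a ≤ c → (∀ a' x, x ∈ xs → a' ≤ c → f a' x ≤ c) →
      List.foldl f a xs ≤ c := by
  intro xs
  induction xs with
  | nil => intro a ha _; simpa using ha
  | cons y t ih =>
    intro a ha hstep
    exact ih (f a y) (hstep a y (by simp) ha) (fun a' x hx => hstep a' x (by simp [hx]))

theorem pv_fold_mem_ge {α : Type} [DecidableEq α] (f : Int → α → Int) (v : Int) (x : α)
    (hmono : ∀ a y, a ≤ f a y) (hx : ∀ a, v ≤ f a x) :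
    ∀ (xs : List α) (a : Int), x ∈ xs → v ≤ List.foldl f a xs := by
  intro xs
  induction xs with
  | nil => intro a h; simp at h
  | cons y t ih =>
    intro a h
    rcases List.mem_cons.mp h with h | h
    · subst h
      exact le_trans (hx a) (pv_fold_ge f hmono t (f a x))
    · exact ih (f a y) h

-- first occurrence index is minimal
theorem pv_idxOf_le {α : Type} [DecidableEq α] :
    ∀ (xs : List α) (i : Nat) (h : i < xs.length), xs.idxOf xs[i] ≤ i := by
  intro xs
  induction xs with
  | nil => intro i h; simp at h
  | cons y t ih =>
    intro i h
    cases i with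
    | zero => simp
    | succ k =>
      have hk : k < t.length := by simpa using h
      by_cases hy : y = t[k]
      · simp [hy]
      · have := ih k hk
        simp only [List.getElem_cons_succ, List.idxOf_cons]
        have hbeq : (y == t[k]) = false := by simpa using hy
        simp [hbeq]
        omega

theorem pvPlist_length (l : List Char) : (pvPlist l).length = l.length + 1 := by
  simp [pvPlist]

theorem pvPlist_getElem (l : List Char) (b : Nat) (h : b < l.length + 1) :
    (pvPlist l)[b]'(by rw [pvPlist_length]; exact h) = pvPref (l.take b) := by
  simp [pvPlist]

theorem pvFO_le (l : List Char) (b : Nat) (h : b ≤ l.length) : pvFO l b ≤ b := by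
  have hb : b < (pvPlist l).length := by rw [pvPlist_length]; omega
  have := pv_idxOf_le (pvPlist l) b hb
  rwa [pvPlist_getElem l b (by omega)] at this

theorem pvPref_take_pvFO (l : List Char) (b : Nat) (h : b ≤ l.length) :
    pvPref (l.take (pvFO l b)) = pvPref (l.take b) := by
  have hmem : pvPref (l.take b) ∈ pvPlist l := by
    rw [← pvPlist_getElem l b (by omega)]
    exact List.getElem_mem _
  have hlt : (pvPlist l).idxOf (pvPref (l.take b)) < (pvPlist l).length :=
    List.idxOf_lt_length_of_mem hmem
  have := List.getElem_idxOf hlt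
  rw [pvPlist_getElem l _ (by rw [pvPlist_length] at hlt; omega)] at this
  exact this

theorem pvFO_congr (l : List Char) (a b : Nat) (h : pvPref (l.take a) = pvPref (l.take b)) :
    pvFO l a = pvFO l b := by unfold pvFO; rw [h]

theorem pvPref_take_succ (l : List Char) (j : Nat) (h : j < l.length) :
    pvPref (l.take (j + 1)) = pvPref (l.take j) ^^^ pvBit l[j] := by
  have : l.take (j + 1) = l.take j ++ [l[j]] := by
    rw [List.take_succ]; simp [List.getElem?_eq_getElem h]
  rw [this]
  unfold pvPref
  rw [List.foldl_append]
  rfl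

-- monotonicity of the spec steps
theorem pvStepA_mono (l : List Char) : ∀ (a : Int) (b : Nat), a ≤ pvStepA l a b := by
  intro a b; unfold pvStepA; split <;> simp

theorem pvStepB_mono (l : List Char) (i : Nat) : ∀ (a : Int) (b : Nat), a ≤ pvStepB l i a b := by
  intro a b; unfold pvStepB; split <;> simp

theorem pvOuterStep_mono (l : List Char) : ∀ (a : Int) (i : Nat), a ≤ pvOuterStep l a i := by
  intro a i; exact pv_fold_ge _ (pvStepB_mono l i) _ a

-- ========== the A-side loop invariant ==========
theorem pvLoopA_eq (l : List Char) :
    ∀ (v : List Char) (idx : Nat) (memo : PySem.Dict Nat Int) (ans : Int),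
      l.drop idx = v →
      (∀ b, b ≤ idx → memo.get? (pvPref (l.take b)) = some ((pvFO l b : Int) - 1)) →
      (∀ p m, memo.get? p = some m → ∃ b, b ≤ idx ∧ pvPref (l.take b) = p) →
      pvLoopA v idx (pvPref (l.take idx)) memo ans =
        List.foldl (pvStepA l) ans (List.range' (idx + 1) (l.length - idx)) := by
  intro v
  induction v with
  | nil =>
    intro idx memo ans hdrop _ _
    have hi : l.length ≤ idx := List.drop_eq_nil_iff.mp hdrop
    have : l.length - idx = 0 := by omega
    simp [pvLoopA, this]
  | cons c v' ih =>
    intro idx memo ans hdrop H1 H2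
    have hil : idx < l.length := by
      have := congrArg List.length hdrop
      simp at this
      omega
    have hc : l[idx] = c := by
      have : (l.drop idx)[0]'(by simp; omega) = l[idx + 0] := List.getElem_drop
      simpa [hdrop] using this.symm
    have hd' : l.drop (idx + 1) = v' := by
      rw [← List.tail_drop, hdrop]; rfl
    have hpfx : pvPref (l.take idx) ^^^ pvBit c = pvPref (l.take (idx + 1)) := by
      rw [pvPref_take_succ l idx hil, hc]
    have hrange : List.range' (idx + 1) (l.length - idx) =
        (idx + 1) :: List.range' (idx + 2) (l.length - (idx + 1)) := by
      have : l.length - idx = (l.length - (idx + 1)) + 1 := by omega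
      rw [this, List.range'_succ]
    rw [hrange, List.foldl_cons]
    rcases hget : memo.get? (pvPref (l.take (idx + 1))) with _ | m
    · -- not seen before: b = idx + 1 is its own first occurrence
      have hFO : pvFO l (idx + 1) = idx + 1 := by
        by_contra hne
        have hle := pvFO_le l (idx + 1) (by omega)
        have hlt : pvFO l (idx + 1) ≤ idx := by omega
        have heq := pvPref_take_pvFO l (idx + 1) (by omega)
        have := H1 (pvFO l (idx + 1)) hlt
        rw [heq, hget] at this
        exact absurd this (by simp)
      have hstep : pvStepA l ans (idx + 1) = ans := by
        unfold pvStepA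
        rw [if_neg (by omega)]
      rw [hstep]
      rw [show pvLoopA (c :: v') idx (pvPref (l.take idx)) memo ans =
        pvLoopA v' (idx + 1) (pvPref (l.take idx) ^^^ pvBit c)
          (memo.insert (pvPref (l.take idx) ^^^ pvBit c) (idx : Int)) ans by
          simp only [pvLoopA]
          rw [hpfx, hget]]
      rw [hpfx]
      refine ih (idx + 1) _ ans hd' ?_ ?_
      · intro b hb
        rw [PySem.Dict.get?_insert]
        by_cases hk : pvPref (l.take b) = pvPref (l.take (idx + 1))
        · rw [if_pos hk]
          rcases Nat.lt_or_ge b (idx + 1) with hblt | hbge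
          · -- impossible: an earlier b with this parity would be in memo
            have := H1 b (by omega)
            rw [hk, hget] at this
            exact absurd this (by simp)
          · have hb' : b = idx + 1 := by omega
            subst hb'
            rw [hFO]
            norm_num
        · rw [if_neg hk]
          rcases Nat.lt_or_ge b (idx + 1) with hblt | hbge
          · exact H1 b (by omega)
          · exfalso
            have hb' : b = idx + 1 := by omega
            subst hb'
            exact hk rfl
      · intro p m hm
        rw [PySem.Dict.get?_insert] at hm
        by_cases hp : p = pvPref (l.take (idx + 1))
        · exact ⟨idx + 1, le_refl _, hp.symm⟩
        · rw [if_neg hp] at hm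
          obtain ⟨b, hb, hbp⟩ := H2 p m hm
          exact ⟨b, by omega, hbp⟩
    · -- seen before: look up the first occurrence
      obtain ⟨b, hb, hbp⟩ := H2 _ m hget
      have hbm := H1 b hb
      rw [hbp, hget] at hbm
      have hm : m = (pvFO l b : Int) - 1 := by simpa using hbm
      have hFOeq' : pvFO l (idx + 1) = pvFO l b := pvFO_congr l (idx + 1) b hbp.symm
      have hFOlt : pvFO l (idx + 1) < idx + 1 := by
        have := pvFO_le l b (by omega)
        omega
      have hstep : pvStepA l ans (idx + 1) = max ans ((idx : Int) - m) := by
        unfold pvStepA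
        rw [if_pos hFOlt]
        congr 1
        rw [hm, hFOeq']
        have hle : pvFO l b ≤ idx + 1 := by omega
        omega
      rw [hstep]
      rw [show pvLoopA (c :: v') idx (pvPref (l.take idx)) memo ans =
        pvLoopA v' (idx + 1) (pvPref (l.take idx) ^^^ pvBit c) memo (max ans ((idx : Int) - m)) by
          simp only [pvLoopA]
          rw [hpfx, hget]]
      rw [hpfx]
      refine ih (idx + 1) _ _ hd' ?_ ?_
      · intro b' hb'
        rcases Nat.lt_or_ge b' (idx + 1) with hblt | hbge
        · exact H1 b' (by omega)
        · have : b' = idx + 1 := by omega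
          subst this
          rw [hget, hm, hFOeq']
      · intro p m' hm'
        obtain ⟨b', hb', hbp'⟩ := H2 p m' hm'
        exact ⟨b', by omega, hbp'⟩

-- ========== the B-side loop invariants ==========
theorem pvLoopBInner_eq (l : List Char) (i : Nat) :
    ∀ (t : List Char) (j : Nat) (mask : Nat) (ans : Int),
      l.drop j = t → i ≤ j → mask = pvPref (l.take j) ^^^ pvPref (l.take i) →
      pvLoopBInner t j i mask ans =
        List.foldl (pvStepB l i) ans (List.range' (j + 1) (l.length - j)) := by
  intro t
  induction t with
  | nil =>
    intro j mask ans hdrop _ _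
    have hj : l.length ≤ j := List.drop_eq_nil_iff.mp hdrop
    have : l.length - j = 0 := by omega
    simp [pvLoopBInner, this]
  | cons c t' ih =>
    intro j mask ans hdrop hij hmask
    have hjl : j < l.length := by
      have := congrArg List.length hdrop
      simp at this
      omega
    have hc : l[j] = c := by
      have : (l.drop j)[0]'(by simp; omega) = l[j + 0] := List.getElem_drop
      simpa [hdrop] using this.symm
    have hd' : l.drop (j + 1) = t' := by
      rw [← List.tail_drop, hdrop]; rfl
    have hmask' : mask ^^^ pvBit c = pvPref (l.take (j + 1)) ^^^ pvPref (l.take i) := by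
      rw [hmask, pvPref_take_succ l j hjl, hc]
      rw [Nat.xor_assoc, Nat.xor_assoc, Nat.xor_comm (pvPref (l.take i))]
    have hrange : List.range' (j + 1) (l.length - j) =
        (j + 1) :: List.range' (j + 2) (l.length - (j + 1)) := by
      have : l.length - j = (l.length - (j + 1)) + 1 := by omega
      rw [this, List.range'_succ]
    have hcond : (mask ^^^ pvBit c = 0) ↔ (pvPref (l.take (j + 1)) = pvPref (l.take i)) := by
      rw [hmask']
      exact Nat.xor_eq_zero
    rw [hrange]
    by_cases hz : mask ^^^ pvBit c = 0
    · have hpe := hcond.mp hz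
      have hstep : pvStepB l i ans (j + 1) = max ans ((j : Int) - (i : Int) + 1) := by
        unfold pvStepB
        rw [if_pos hpe]
        congr 1
        have : ((j + 1 - i : Nat) : Int) = (j : Int) - (i : Int) + 1 := by omega
        rw [this]
      rw [List.foldl_cons, hstep]
      rw [show pvLoopBInner (c :: t') j i mask ans =
        pvLoopBInner t' (j + 1) i (mask ^^^ pvBit c) (max ans ((j : Int) - (i : Int) + 1)) by
          simp [pvLoopBInner, hz]]
      exact ih (j + 1) _ _ hd' (by omega) hmask'
    · have hpe : ¬ (pvPref (l.take (j + 1)) = pvPref (l.take i)) := fun h => hz (hcond.mpr h)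
      have hstep : pvStepB l i ans (j + 1) = ans := by unfold pvStepB; rw [if_neg hpe]
      rw [List.foldl_cons, hstep]
      rw [show pvLoopBInner (c :: t') j i mask ans =
        pvLoopBInner t' (j + 1) i (mask ^^^ pvBit c) ans by simp [pvLoopBInner, hz]]
      exact ih (j + 1) _ _ hd' (by omega) hmask'

theorem pvLoopBOuter_eq (l : List Char) :
    ∀ (s : List Char) (i : Nat) (ans : Int), l.drop i = s →
      pvLoopBOuter s i ans = List.foldl (pvOuterStep l) ans (List.range' i (l.length - i)) := by
  intro s
  induction s with
  | nil =>
    intro i ans hdrop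
    have hi : l.length ≤ i := List.drop_eq_nil_iff.mp hdrop
    have : l.length - i = 0 := by omega
    simp [pvLoopBOuter, this]
  | cons c s' ih =>
    intro i ans hdrop
    have hil : i < l.length := by
      have := congrArg List.length hdrop
      simp at this
      omega
    have hd' : l.drop (i + 1) = s' := by
      rw [← List.tail_drop, hdrop]; rfl
    have hinner : pvLoopBInner (c :: s') i i 0 ans = pvOuterStep l ans i := by
      have := pvLoopBInner_eq l i (c :: s') i 0 ans hdrop (le_refl i) (by rw [Nat.xor_self])
      rw [this]; rfl
    have hrange : List.range' i (l.length - i) =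
        i :: List.range' (i + 1) (l.length - (i + 1)) := by
      have : l.length - i = (l.length - (i + 1)) + 1 := by omega
      rw [this, List.range'_succ]
    rw [hrange, List.foldl_cons, show pvLoopBOuter (c :: s') i ans =
      pvLoopBOuter s' (i + 1) (pvLoopBInner (c :: s') i i 0 ans) from rfl, hinner]
    exact ih (i + 1) _ hd'

-- ========== the two spec folds agree ==========
theorem pv_SA_eq_SB (l : List Char) :
    List.foldl (pvStepA l) 0 (List.range' 1 l.length) =
      List.foldl (pvOuterStep l) 0 (List.range' 0 l.length) := by
  apply le_antisymm
  · -- every contribution b - pvFO l b appears in row pvFO l b of the nested fold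
    apply pv_fold_le
    · exact pv_fold_ge _ (pvOuterStep_mono l) _ 0
    · intro a' b hb ha'
      unfold pvStepA
      split_ifs with hcond
      · refine max_le ha' ?_
        obtain ⟨hb1, hb2⟩ := List.mem_range'_1.mp hb
        have hbn : b ≤ l.length := by omega
        have han : pvFO l b < l.length := by omega
        refine pv_fold_mem_ge (pvOuterStep l) _ (pvFO l b) (pvOuterStep_mono l) ?_ _ 0
          (List.mem_range'_1.mpr ⟨Nat.zero_le _, by omega⟩)
        intro acc
        unfold pvOuterStep
        refine pv_fold_mem_ge (pvStepB l (pvFO l b)) _ b (pvStepB_mono l _) ?_ _ acc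
          (List.mem_range'_1.mpr ⟨by omega, by omega⟩)
        intro acc2
        unfold pvStepB
        rw [if_pos (pvPref_take_pvFO l b hbn).symm]
        exact le_max_right _ _
      · exact ha'
  · -- every pair contribution b - i is dominated by b - pvFO l b
    apply pv_fold_le
    · exact pv_fold_ge _ (pvStepA_mono l) _ 0
    · intro acc i hi hacc
      obtain ⟨_, hi2⟩ := List.mem_range'_1.mp hi
      unfold pvOuterStep
      apply pv_fold_le
      · exact hacc
      · intro acc' b hb hacc'
        unfold pvStepB
        split_ifs with hcond
        · refine max_le hacc' ?_
          obtain ⟨hb1, hb2⟩ := List.mem_range'_1.mp hb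
          have hbn : b ≤ l.length := by omega
          have hFOle : pvFO l b ≤ i := by
            rw [pvFO_congr l b i hcond]
            exact pvFO_le l i (by omega)
          refine pv_fold_mem_ge (pvStepA l) _ b (pvStepA_mono l) ?_ _ 0
            (List.mem_range'_1.mpr ⟨by omega, by omega⟩)
          intro acc2
          unfold pvStepA
          rw [if_pos (by omega)]
          refine le_trans ?_ (le_max_right _ _)
          exact_mod_cast Nat.sub_le_sub_left hFOle b
        · exact hacc'

-- ===== VERDICT =====
theorem code3_v2_spec : Claim_equal_code3_v2 := by
  intro data _ _
  show code3_v2 data = code3_v2_alt data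
  unfold code3_v2 code3_v2_alt
  set l := data.toList with hl
  have h0' : pvPref (l.take 0) = 0 := by simp [pvPref]
  have h0 : pvFO l 0 = 0 := by
    have := pvFO_le l 0 (by omega)
    omega
  have hA := pvLoopA_eq l l 0 ((PySem.Dict.empty).insert 0 (-1)) 0 (by simp)
    (by
      intro b hb
      interval_cases b
      rw [h0', PySem.Dict.get?_insert, if_pos rfl, h0]
      norm_num)
    (by
      intro p m hm
      rw [PySem.Dict.get?_insert] at hm
      by_cases hp : p = 0
      · exact ⟨0, by omega, by simpa [hp] using h0'⟩
      · rw [if_neg hp, PySem.Dict.get?_empty] at hm; exact absurd hm (by simp))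
  rw [h0'] at hA
  simp only [Nat.zero_add, Nat.sub_zero] at hA
  have hB := pvLoopBOuter_eq l l 0 0 (by simp)
  simp only [Nat.sub_zero] at hB
  rw [hA, hB, pv_SA_eq_SB]
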